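-- pv_equiv track=rewrite | github.com/siddharth-bhatia5/cs-115-c | CS 115 - Lecture Notes/CS 115 - Lecture Notes ~ lecture14 - Use It or Lose It Recursion.py | recursive_length
-- ===== SOURCE A (Python) =====
-- def recursive_length(L):
--     base_val = 0
--     def recursive_step(h, t):
--         head_contribution = 1
--         tail_contribution = recursive_length(t)
--         return head_contribution + tail_contribution
--     if not L:
--         result = base_val
--     else:
--         head, tail = L[0], L[1:]
--         result = recursive_step(head, tail)
--     return result
-- ===== SOURCE B (Python) =====
-- def recursive_length(L):
--     count = 0
--     for _ in L:
--         count += 1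
--     return count
-- ===== Notes on version B (the rewrite author's own statement) =====
-- stated objective: simpler
-- what changed: Replaced the recursion over tail slices with a single iterative loop maintaining a running counter.
import Mathlib
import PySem

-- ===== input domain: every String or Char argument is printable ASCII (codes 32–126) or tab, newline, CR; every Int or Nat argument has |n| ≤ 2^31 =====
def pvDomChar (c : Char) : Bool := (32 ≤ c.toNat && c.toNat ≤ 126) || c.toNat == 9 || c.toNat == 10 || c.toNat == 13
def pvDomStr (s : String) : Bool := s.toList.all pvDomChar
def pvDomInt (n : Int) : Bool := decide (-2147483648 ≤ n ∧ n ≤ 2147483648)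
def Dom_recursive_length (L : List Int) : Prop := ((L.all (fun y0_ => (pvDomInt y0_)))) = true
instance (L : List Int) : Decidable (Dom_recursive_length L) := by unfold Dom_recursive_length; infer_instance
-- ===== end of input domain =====

-- B replaces the tail-slice recursion with an iterative running counter (simpler, avoids repeated list copies).

-- ===== PORT A =====
-- A: if L empty, result = 0; else head/tail split and 1 + recursive_length(tail)
def recursive_length (L : List Int) : Int :=
  match L with
  | [] => (0 : Int)          -- base_val
  | _ :: tail =>
      -- recursive_step: head_contribution + tail_contribution
      1 + recursive_length tail

-- ===== PORT B =====
-- B: count = 0; for _ in L: count += 1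
def recursive_length_alt (L : List Int) : Int :=
  L.foldl (fun count _ => count + 1) 0

-- ===== PRECONDITION & SPEC =====
def Spec_recursive_length (L : List Int) (out : Int) : Prop := out = recursive_length_alt L
instance (L : List Int) (out : Int) : Decidable (Spec_recursive_length L out) := by unfold Spec_recursive_length; infer_instance

-- ===== CLAIM (what is proved, stated in full; the proofs are below) =====
def Claim_equal_recursive_length : Prop := ∀ (L : List Int), Dom_recursive_length L → Spec_recursive_length L (recursive_length L)

-- ===== LEMMAS AND PROOFS =====
theorem recursive_length_eq_length (L : List Int) : recursive_length L = (L.length : Int) := by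
  induction L with
  | nil => simp [recursive_length]
  | cons h t ih => simp [recursive_length, ih]; omega

theorem recursive_length_alt_acc (L : List Int) (c : Int) :
    L.foldl (fun count _ => count + 1) c = c + (L.length : Int) := by
  induction L generalizing c with
  | nil => simp
  | cons h t ih => simp [List.foldl, ih]; omega

-- ===== VERDICT (by name: the statement is the Claim_ definition above) =====
theorem recursive_length_spec : Claim_equal_recursive_length := by
  intro L _
  unfold Spec_recursive_length recursive_length_alt
  rw [recursive_length_eq_length, recursive_length_alt_acc]
  omega
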